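-- pv_equiv track=rewrite | github.com/Smail-Har/sentinel_audit | sentinel_audit/core/utils.py | parse_sshd_config
-- ===== SOURCE A (Python) =====
-- def parse_sshd_config(text: str) -> dict[str, str]:
--     """
--     Parse ``sshd_config``-style directives (space-separated key value).
--
--     Only the first occurrence of each directive is kept (matching sshd
--     behaviour where the first definition wins).
--     """
--     result: dict[str, str] = {}
--     for line in text.splitlines():
--         stripped = line.strip()
--         if not stripped or stripped.startswith("#"):
--             continue
--         parts = stripped.split(None, 1)   # split on first whitespace
--         if len(parts) == 2:
--             key = parts[0]
--             if key not in result:          # first definition wins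
--                 result[key] = parts[1]
--     return result
-- ===== SOURCE B (Python) =====
-- def parse_sshd_config(text: str) -> dict[str, str]:
--     """Two-phase parse: collect all (key, value) pairs, then build the
--     first-wins dict by overwriting in reverse order and restoring
--     first-occurrence key order with dict.fromkeys."""
--     pairs = []
--     for line in text.splitlines():
--         s = line.strip()
--         if s and not s.startswith("#"):
--             p = s.split(None, 1)
--             if len(p) == 2:
--                 pairs.append((p[0], p[1]))
--     firstval = dict(reversed(pairs))          # last overwrite = first occurrence
--     return {k: firstval[k] for k in dict.fromkeys(k for k, _ in pairs)}
-- ===== Notes on version B (the rewrite author's own statement) =====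
-- stated objective: alternative
-- what changed: Replaces the incremental membership-guarded first-wins insertion by a two-phase construction: collect every (key, value) pair, build the value map with dict(reversed(pairs)) so the earliest value survives the overwrite, and restore first-occurrence key order with dict.fromkeys.
import Mathlib
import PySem

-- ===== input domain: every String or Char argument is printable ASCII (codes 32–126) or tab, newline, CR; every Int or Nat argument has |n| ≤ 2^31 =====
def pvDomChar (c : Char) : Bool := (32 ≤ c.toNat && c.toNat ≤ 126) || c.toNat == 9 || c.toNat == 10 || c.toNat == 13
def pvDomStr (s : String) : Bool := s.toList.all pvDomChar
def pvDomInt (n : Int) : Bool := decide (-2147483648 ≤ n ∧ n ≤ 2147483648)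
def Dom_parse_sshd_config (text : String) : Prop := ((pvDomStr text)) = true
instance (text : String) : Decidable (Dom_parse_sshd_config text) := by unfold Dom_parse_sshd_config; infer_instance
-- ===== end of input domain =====

-- B replaces A's incremental membership-guarded first-wins insertion by a two-phase construction:
-- collect all (key, value) pairs, build the value map by reverse-order overwriting, restore
-- first-occurrence key order with an ordered dedup of the keys (alternative decomposition).

-- ===== PORT A =====
def parse_sshd_config (text : String) : List (String × String) :=
  ((PySem.Str.splitlines text).foldl (fun result line =>
    let stripped := PySem.Str.strip line
    if stripped == "" || PySem.Str.startswith stripped "#" then result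
    else
      let parts := PySem.Str.split₀Max stripped 1
      if parts.length == 2 then
        let key := parts[0]!
        if result.contains key then result
        else result.insert key (parts[1]!)
      else result) (PySem.Dict.empty : PySem.Dict String String)).items


-- ===== PORT B =====
def parse_sshd_config_alt (text : String) : List (String × String) :=
  let pairs := (PySem.Str.splitlines text).foldl (fun acc line =>
    let s := PySem.Str.strip line
    if s != "" && !(PySem.Str.startswith s "#") then
      let p := PySem.Str.split₀Max s 1
      if p.length == 2 then acc ++ [(p[0]!, p[1]!)] else acc
    else acc) []
  let firstval : PySem.Dict String String := PySem.Dict.ofList pairs.reverse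
  (PySem.List.dedup (pairs.map (·.1))).map (fun k => (k, (firstval.get? k).getD ""))


-- ===== PRECONDITION & SPEC =====
def Spec_parse_sshd_config (text : String) (out : List (String × String)) : Prop := out = parse_sshd_config_alt text
instance (text : String) (out : List (String × String)) : Decidable (Spec_parse_sshd_config text out) := by unfold Spec_parse_sshd_config; infer_instance

-- ===== CLAIM (what is proved, stated in full; the proofs are below) =====
def Claim_equal_parse_sshd_config : Prop := ∀ (text : String), Dom_parse_sshd_config text → Spec_parse_sshd_config text (parse_sshd_config text)

-- ===== LEMMAS AND PROOFS =====


def pvFW : List (String × String) → List (String × String)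
  | [] => []
  | (k, v) :: rest => (k, v) :: pvFW (rest.filter (fun p => decide (p.1 ≠ k)))
termination_by l => l.length
decreasing_by
  simp only [List.length_cons, List.length_unattach]
  exact Nat.lt_succ_of_le (le_trans (List.length_filter_le _ _) (by simp))

def pvFD : List String → List String
  | [] => []
  | x :: xs => x :: pvFD (xs.filter (fun y => decide (y ≠ x)))
termination_by l => l.length
decreasing_by
  simp only [List.length_cons, List.length_unattach]
  exact Nat.lt_succ_of_le (le_trans (List.length_filter_le _ _) (by simp))

theorem pvFW_map_fst (ps : List (String × String)) :
    (pvFW ps).map (·.1) = pvFD (ps.map (·.1)) := by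
  generalize hn : ps.length = n
  induction n using Nat.strong_induction_on generalizing ps with
  | _ n ih =>
    cases ps with
    | nil => simp [pvFW, pvFD]
    | cons hd tl =>
      obtain ⟨k, v⟩ := hd
      rw [pvFW.eq_2, List.map_cons, List.map_cons, pvFD.eq_2, List.filter_map]
      subst hn
      rw [ih _ (Nat.lt_succ_of_le (List.length_filter_le _ _)) _ rfl]
      rfl

theorem pvFW_subset (ps : List (String × String)) : ∀ p ∈ pvFW ps, p ∈ ps := by
  generalize hn : ps.length = n
  induction n using Nat.strong_induction_on generalizing ps with
  | _ n ih =>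
    cases ps with
    | nil => simp [pvFW]
    | cons hd tl =>
      obtain ⟨k, v⟩ := hd
      rw [pvFW.eq_2]
      intro p hp
      rcases List.mem_cons.mp hp with h | h
      · simp [h]
      · subst hn
        exact List.mem_cons_of_mem _
          (List.mem_of_mem_filter (ih _ (Nat.lt_succ_of_le (List.length_filter_le _ _)) _ rfl p h))

theorem pvSet_ofList_eq (l acc : List String) :
    List.foldl PySem.Set.add acc l = acc ++ pvFD (l.filter (fun x => !(PySem.Set.contains acc x))) := by
  induction l generalizing acc with
  | nil => simp [pvFD]
  | cons x xs ih =>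
    simp only [List.foldl_cons]
    by_cases hx : PySem.Set.contains acc x = true
    · rw [show PySem.Set.add acc x = acc from by rw [PySem.Set.add, if_pos hx], ih]
      congr 2
      rw [List.filter_cons]
      simp only [hx, Bool.not_true, Bool.false_eq_true, if_false]
    · rw [show PySem.Set.add acc x = acc ++ [x] from by rw [PySem.Set.add, if_neg hx], ih, List.append_assoc]
      congr 1
      rw [List.filter_cons]
      simp only [hx, Bool.not_false, if_pos, List.singleton_append]
      rw [pvFD.eq_2]
      congr 1
      rw [List.filter_filter]
      congr 1
      apply List.filter_congr
      intro y _
      simp only [PySem.Set.contains, List.contains_eq_mem, List.mem_append, List.mem_singleton]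
      by_cases h1 : y ∈ acc <;> by_cases h2 : y = x <;> simp [h1, h2]
theorem pvDedup_eq (l : List String) : PySem.List.dedup l = pvFD l := by
  rw [PySem.List.dedup, PySem.Set.ofList, pvSet_ofList_eq]
  simp [PySem.Set.contains, PySem.Set.empty]

theorem pvGet_foldl_insert (l : List (String × String)) (d : PySem.Dict String String) (k : String) :
    (l.foldl (fun acc p => acc.insert p.1 p.2) d).get? k
      = ((l.reverse.find? (fun p => p.1 == k)).map (·.2)).or (d.get? k) := by
  induction l generalizing d with
  | nil => simp
  | cons p l ih =>
    simp only [List.foldl_cons, List.reverse_cons, List.find?_append, ih]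
    rw [Option.map_or]
    rw [Option.or_assoc]
    congr 1
    rw [PySem.Dict.get?_insert]
    by_cases h : k = p.1
    · simp [List.find?_cons, h]
    · have : (p.1 == k) = false := by simp [Ne.symm h]
      simp [List.find?_cons, this, h]

theorem pvGet_ofList_rev (ps : List (String × String)) (k : String) :
    (PySem.Dict.ofList ps.reverse).get? k = (ps.find? (fun p => p.1 == k)).map (·.2) := by
  rw [PySem.Dict.ofList, PySem.Dict.update, pvGet_foldl_insert, List.reverse_reverse]
  simp [PySem.Dict.get?_empty]

theorem pvFind_filter_ne (l : List (String × String)) (k k' : String) (h : k' ≠ k) :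
    (l.filter (fun p => decide (p.1 ≠ k))).find? (fun p => p.1 == k') = l.find? (fun p => p.1 == k') := by
  induction l with
  | nil => rfl
  | cons p l ih =>
    rw [List.filter_cons]
    by_cases hp : p.1 = k
    · simp only [hp, ne_eq, not_true_eq_false, decide_false, Bool.false_eq_true, if_false]
      rw [ih, List.find?_cons]
      have : (p.1 == k') = false := by simp [hp, Ne.symm h]
      simp [this]
    · simp only [hp, ne_eq, not_false_eq_true, decide_true, if_true]
      cases hh : (p.1 == k') with
      | false => simp only [List.find?_cons, hh]; exact ih
      | true => simp only [List.find?_cons, hh]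

theorem pvB_eq_FW (ps : List (String × String)) :
    ((pvFW ps).map (·.1)).map (fun k => (k, ((ps.find? (fun p => p.1 == k)).map (·.2)).getD "")) = pvFW ps := by
  generalize hn : ps.length = n
  induction n using Nat.strong_induction_on generalizing ps with
  | _ n ih =>
    cases ps with
    | nil => simp [pvFW]
    | cons hd tl =>
      obtain ⟨k, v⟩ := hd
      rw [pvFW.eq_2, List.map_cons, List.map_cons]
      congr 1
      · simp [List.find?_cons]
      · have hmem : ∀ k' ∈ (pvFW (tl.filter (fun p => decide (p.1 ≠ k)))).map (·.1), k' ≠ k := by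
          intro k' hk'
          obtain ⟨q, hq, rfl⟩ := List.mem_map.mp hk'
          have := pvFW_subset _ q hq
          have := List.of_mem_filter this
          simpa using this
        rw [List.map_congr_left (fun k' hk' => by
          have hne := hmem k' hk'
          have h1 : ((k, v) :: tl).find? (fun p => p.1 == k') = tl.find? (fun p => p.1 == k') := by
            rw [List.find?_cons]
            have : (k == k') = false := by simp [Ne.symm hne]
            simp [this]
          rw [h1, ← pvFind_filter_ne tl k k' hne])]
        subst hn
        exact ih _ (Nat.lt_succ_of_le (List.length_filter_le _ _)) _ rfl

theorem pvA_fold_items (ps : List (String × String)) (d : PySem.Dict String String) :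
    (ps.foldl (fun d p => if d.contains p.1 then d else d.insert p.1 p.2) d).items
      = d.items ++ pvFW (ps.filter (fun p => !(d.contains p.1))) := by
  induction ps generalizing d with
  | nil => simp [pvFW]
  | cons p ps ih =>
    obtain ⟨k0, v0⟩ := p
    simp only [List.foldl_cons]
    by_cases hc : d.contains k0 = true
    · rw [if_pos hc, ih, List.filter_cons]
      simp only [hc, Bool.not_true, Bool.false_eq_true, if_false]
    · rw [if_neg hc, ih, List.filter_cons]
      simp only [hc, Bool.not_false, if_pos]
      rw [PySem.Dict.items_insert_of_not_contains d _ (by simpa using hc)]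
      rw [List.append_assoc, List.singleton_append, pvFW.eq_2]
      congr 2
      rw [List.filter_filter]
      congr 1
      apply List.filter_congr
      intro q _
      rw [PySem.Dict.contains_insert]
      by_cases h1 : q.1 = k0 <;> by_cases h2 : d.contains q.1 = true <;> simp [h1, h2]

def pvLinePairs (line : String) : List (String × String) :=
  let s := PySem.Str.strip line
  if s == "" || PySem.Str.startswith s "#" then []
  else
    let p := PySem.Str.split₀Max s 1
    if p.length == 2 then [(p[0]!, p[1]!)] else []

theorem pvCond (a b : Bool) : (!a && !b) = !(a || b) := by cases a <;> cases b <;> rfl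

theorem pvPairs_eq (lines : List String) (acc : List (String × String)) :
    lines.foldl (fun acc line =>
      let s := PySem.Str.strip line
      if s != "" && !(PySem.Str.startswith s "#") then
        let p := PySem.Str.split₀Max s 1
        if p.length == 2 then acc ++ [(p[0]!, p[1]!)] else acc
      else acc) acc = acc ++ lines.flatMap pvLinePairs := by
  induction lines generalizing acc with
  | nil => simp
  | cons line lines ih =>
    simp only [List.foldl_cons, List.flatMap_cons]
    rw [ih]
    have hb : (let s := PySem.Str.strip line
         if s != "" && !(PySem.Str.startswith s "#") then
           let p := PySem.Str.split₀Max s 1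
           if p.length == 2 then acc ++ [(p[0]!, p[1]!)] else acc
         else acc) = acc ++ pvLinePairs line := by
      show (if (PySem.Str.strip line != "" && !(PySem.Str.startswith (PySem.Str.strip line) "#")) = true then
           if ((PySem.Str.split₀Max (PySem.Str.strip line) 1).length == 2) = true
           then acc ++ [((PySem.Str.split₀Max (PySem.Str.strip line) 1)[0]!, (PySem.Str.split₀Max (PySem.Str.strip line) 1)[1]!)] else acc
         else acc) = acc ++ pvLinePairs line
      rw [pvLinePairs, show (PySem.Str.strip line != "") = !(PySem.Str.strip line == "") from rfl, pvCond]
      cases hg : (PySem.Str.strip line == "" || PySem.Str.startswith (PySem.Str.strip line) "#") with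
      | true => simp only [hg, Bool.not_true, Bool.false_eq_true, if_false, if_pos, List.append_nil]
      | false =>
        simp only [Bool.not_false, if_true, Bool.false_eq_true, if_false]
        cases h2 : ((PySem.Str.split₀Max (PySem.Str.strip line) 1).length == 2) with
        | true => simp
        | false => simp
    rw [hb, List.append_assoc]

theorem pvA_fold_lines (lines : List String) (d : PySem.Dict String String) :
    lines.foldl (fun result line =>
      let stripped := PySem.Str.strip line
      if stripped == "" || PySem.Str.startswith stripped "#" then result
      else
        let parts := PySem.Str.split₀Max stripped 1
        if parts.length == 2 then
          let key := parts[0]!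
          if result.contains key then result
          else result.insert key (parts[1]!)
        else result) d
    = (lines.flatMap pvLinePairs).foldl (fun d p => if d.contains p.1 then d else d.insert p.1 p.2) d := by
  induction lines generalizing d with
  | nil => simp
  | cons line lines ih =>
    simp only [List.foldl_cons, List.flatMap_cons, List.foldl_append]
    rw [ih]
    congr 1
    rw [pvLinePairs]
    cases hg : (PySem.Str.strip line == "" || PySem.Str.startswith (PySem.Str.strip line) "#") with
    | true => simp only [hg, if_pos, List.foldl_nil]
    | false =>
      simp only [hg, Bool.false_eq_true, if_false]
      cases h2 : ((PySem.Str.split₀Max (PySem.Str.strip line) 1).length == 2) with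
      | true => simp only [h2, if_pos, List.foldl_cons, List.foldl_nil]
      | false => simp only [h2, Bool.false_eq_true, if_false, List.foldl_nil]


theorem pv_main (text : String) : parse_sshd_config text = parse_sshd_config_alt text := by
  rw [parse_sshd_config, parse_sshd_config_alt, pvA_fold_lines, pvPairs_eq, List.nil_append,
    pvA_fold_items]
  have hfilter : ∀ (L : List (String × String)),
      L.filter (fun p => !((PySem.Dict.empty : PySem.Dict String String).contains p.1)) = L := by
    intro L
    apply List.filter_eq_self.mpr
    intro p _
    simp [PySem.Dict.contains_empty]
  rw [hfilter]
  simp only [PySem.Dict.empty, List.nil_append]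
  rw [pvDedup_eq, ← pvFW_map_fst]
  simp only [pvGet_ofList_rev]
  have := pvB_eq_FW ((PySem.Str.splitlines text).flatMap pvLinePairs)
  simp only [Option.getD] at this ⊢
  exact this.symm

-- ===== VERDICT (by name: the statement is the Claim_ definition above) =====
theorem parse_sshd_config_spec : Claim_equal_parse_sshd_config := by
  intro text _
  unfold Spec_parse_sshd_config
  exact pv_main text
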